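-- pv_equiv track=rewrite | github.com/sabrinarittinger/Experiment | models.py | outputfromtable
-- ===== SOURCE A (Python) =====
-- def outputfromtable(select, number):
--     payoffmatrix = [0] * 20
--     for k in range(20):
--         payoffmatrix[k] = [0]*20
--     #matrix = [[0 for x in range(w)] for y in range(h)]
--     outcomes = [5,5,10,20,20,30,30,30,45,45,60,60,60,80,80,95,95,95,100,100]
--     for i in range(20):
--         for j in range(20):
--             if(j>=i):
--                 payoffmatrix[i][j]=outcomes[i]
--     matrixnew = payoffmatrix
--     stateofnature= [17,17,17,17,17,6,6,6,6,6,14,14,14,14,14,10,10,10,10,10,7,7,7,7,7,12,12,12,12,12,4,4,4,4,4,16,16,16,16,16,11,11,11,11,11,6,6,6,6,6,14,14,14,14,14,17,17,17,17,17]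
--     state = stateofnature[number-1]
--     result = 0
--     if (select > 0):
--         result = matrixnew[select-1][state-1]
--     return result
-- ===== SOURCE B (Python) =====
-- def outputfromtable(select, number):
--     # The 60-entry stateofnature table is 12 blocks of 5 identical values:
--     # compute the block index arithmetically instead of storing the full table,
--     # and read the payoff straight from the 1-D outcomes list (no 20x20 matrix).
--     blocks = [17, 6, 14, 10, 7, 12, 4, 16, 11, 6, 14, 17]
--     state = blocks[((number - 1) % 60) // 5]
--     if select <= 0:
--         return 0
--     payoff = [5,5,10,20,20,30,30,30,45,45,60,60,60,80,80,95,95,95,100,100][select - 1]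
--     return payoff if state >= select else 0
-- ===== Notes on version B (the rewrite author's own statement) =====
-- stated objective: simpler
-- what changed: B drops A's 20x20 matrix allocation and nested fill loops and the 60-entry state table: it computes the state arithmetically from a 12-entry block list via ((number-1) % 60)//5 and reads the payoff directly from the 1-D outcomes list, returning it only when state >= select (exactly when A's matrix cell is nonzero).
import Mathlib
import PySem

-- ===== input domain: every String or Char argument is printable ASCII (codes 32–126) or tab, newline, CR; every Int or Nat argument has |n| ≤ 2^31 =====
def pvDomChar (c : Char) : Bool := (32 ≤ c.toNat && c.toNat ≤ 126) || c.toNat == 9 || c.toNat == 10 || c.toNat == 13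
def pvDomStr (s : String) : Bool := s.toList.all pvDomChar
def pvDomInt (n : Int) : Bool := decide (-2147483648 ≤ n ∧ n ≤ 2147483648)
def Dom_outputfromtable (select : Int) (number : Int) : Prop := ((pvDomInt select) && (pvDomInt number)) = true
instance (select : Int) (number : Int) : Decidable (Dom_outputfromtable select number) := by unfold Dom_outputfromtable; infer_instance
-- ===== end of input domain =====

-- B replaces A's 20x20 matrix build and 60-entry state table by an arithmetic
-- block lookup ((number-1) % 60)//5 into a 12-entry list plus a direct 1-D
-- payoff read (objective: simpler).

-- ===== PORT A =====
-- A's constant tables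
def pvOutcomesA : List Int := [5,5,10,20,20,30,30,30,45,45,60,60,60,80,80,95,95,95,100,100]
def pvStatesA : List Int := [17,17,17,17,17,6,6,6,6,6,14,14,14,14,14,10,10,10,10,10,7,7,7,7,7,12,12,12,12,12,4,4,4,4,4,16,16,16,16,16,11,11,11,11,11,6,6,6,6,6,14,14,14,14,14,17,17,17,17,17]

-- A's matrix construction: [0]*20 rows (each immediately overwritten by a
-- fresh [0]*20 row in the first loop), then the nested fill loop
-- payoffmatrix[i][j] = outcomes[i] for j >= i.
def pvPayoffMatrixA : List (List Int) :=
  let m0 := (PySem.List.pyRange 0 20 1).foldl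
      (fun m k => PySem.List.pySetD m k (List.replicate 20 (0:Int)))
      (List.replicate 20 ([] : List Int))
  (PySem.List.pyRange 0 20 1).foldl (fun m i =>
    (PySem.List.pyRange 0 20 1).foldl (fun m j =>
      if j ≥ i then
        PySem.List.pySetD m i
          (PySem.List.pySetD (PySem.List.pyGetD m i []) j (PySem.List.pyGetD pvOutcomesA i 0))
      else m) m) m0

def outputfromtable (select : Int) (number : Int) : Int :=
  let matrixnew := pvPayoffMatrixA
  let state := PySem.List.pyGetD pvStatesA (number - 1) 0
  if select > 0 then
    PySem.List.pyGetD (PySem.List.pyGetD matrixnew (select - 1) []) (state - 1) 0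
  else 0

-- ===== PORT B =====
def outputfromtable_alt (select : Int) (number : Int) : Int :=
  let blocks : List Int := [17, 6, 14, 10, 7, 12, 4, 16, 11, 6, 14, 17]
  let state := PySem.List.pyGetD blocks
      (PySem.Int.floordiv (PySem.Int.mod (number - 1) 60) 5) 0
  if select ≤ 0 then 0
  else
    let payoff := PySem.List.pyGetD
      [5,5,10,20,20,30,30,30,45,45,60,60,60,80,80,95,95,95,100,100] (select - 1) 0
    if state ≥ select then payoff else 0

-- ===== PRECONDITION & SPEC =====
-- Pre_ excludes exactly the inputs where Python A raises IndexError: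
-- number-1 outside the length-60 stateofnature index range, or select-1 ≥ 20 inside the select>0 branch.
def Pre_outputfromtable (select : Int) (number : Int) : Prop :=
  select ≤ 20 ∧ -59 ≤ number ∧ number ≤ 60
instance (select : Int) (number : Int) : Decidable (Pre_outputfromtable select number) := by
  unfold Pre_outputfromtable; infer_instance
def pvWitness_outputfromtable : Int × Int := (3, 5)

def Spec_outputfromtable (select : Int) (number : Int) (out : Int) : Prop := out = outputfromtable_alt select number
instance (select : Int) (number : Int) (out : Int) : Decidable (Spec_outputfromtable select number out) := by unfold Spec_outputfromtable; infer_instance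

-- ===== CLAIM =====
def Claim_equal_outputfromtable : Prop := ∀ (select : Int) (number : Int), Dom_outputfromtable select number → Pre_outputfromtable select number → Spec_outputfromtable select number (outputfromtable select number)

-- ===== LEMMAS AND PROOFS =====

-- finite check: for select in 1..20 and number in -59..60 the two ports agree
set_option maxRecDepth 40000 in
set_option maxHeartbeats 2000000 in
theorem pv_key : ∀ si ∈ List.range 20, ∀ ni ∈ List.range 120,
    outputfromtable ((si : Int) + 1) ((ni : Int) - 59)
      = outputfromtable_alt ((si : Int) + 1) ((ni : Int) - 59) := by
  decide

-- for select ≤ 0 both ports return 0 but B still computes state; check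
-- B's 0 directly for that branch with number in range
set_option maxRecDepth 40000 in
theorem pv_alt_nonpos (select number : Int) (hs : select ≤ 0) :
    outputfromtable_alt select number = 0 := by
  simp [outputfromtable_alt, hs]

-- ===== VERDICT =====
theorem outputfromtable_spec : Claim_equal_outputfromtable := by
  intro select number _ hpre
  obtain ⟨h20, hlo, hhi⟩ := hpre
  unfold Spec_outputfromtable
  by_cases hs : select ≤ 0
  · rw [pv_alt_nonpos select number hs]
    simp [outputfromtable, not_lt.mpr hs]
  · have h1 : select = ((select - 1).toNat : Int) + 1 := by omega
    have h2 : number = ((number + 59).toNat : Int) - 59 := by omega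
    rw [h1, h2]
    exact pv_key _ (List.mem_range.mpr (by omega)) _ (List.mem_range.mpr (by omega))
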